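-- pv_equiv track=rewrite | github.com/dbe/aoc2018py | 7/1.py | create_step_prereqs
-- ===== SOURCE A (Python) =====
-- def create_step_prereqs(instructions):
--     step_prereqs = {}
--     for instruction in instructions:
--         if(instruction[0] not in step_prereqs):
--             step_prereqs[instruction[0]] = set()
--
--         if(instruction[1] not in step_prereqs):
--             step_prereqs[instruction[1]] = set()
--
--         step_prereqs[instruction[1]].add(instruction[0])
--
--     return step_prereqs
-- ===== SOURCE B (Python) =====
-- def create_step_prereqs(instructions):
--     # Grouping by per-key scan: list the distinct steps (first-occurrence order),
--     # then compute each step's prerequisite set directly with a set comprehension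
--     # over the instruction list -- no incremental dict/set mutation at all.
--     steps = dict.fromkeys(s for pair in instructions for s in pair)
--     return {s: {a for a, b in instructions if b == s} for s in steps}
-- ===== Notes on version B (the rewrite author's own statement) =====
-- stated objective: alternative
-- what changed: Replaces A's single incremental fold that mutates a dict of growing sets by a grouping-by-scan: list the distinct steps once, then build each step's prerequisite set directly with an independent filter/comprehension over the instruction list (no dict or set mutation).
import Mathlib
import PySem

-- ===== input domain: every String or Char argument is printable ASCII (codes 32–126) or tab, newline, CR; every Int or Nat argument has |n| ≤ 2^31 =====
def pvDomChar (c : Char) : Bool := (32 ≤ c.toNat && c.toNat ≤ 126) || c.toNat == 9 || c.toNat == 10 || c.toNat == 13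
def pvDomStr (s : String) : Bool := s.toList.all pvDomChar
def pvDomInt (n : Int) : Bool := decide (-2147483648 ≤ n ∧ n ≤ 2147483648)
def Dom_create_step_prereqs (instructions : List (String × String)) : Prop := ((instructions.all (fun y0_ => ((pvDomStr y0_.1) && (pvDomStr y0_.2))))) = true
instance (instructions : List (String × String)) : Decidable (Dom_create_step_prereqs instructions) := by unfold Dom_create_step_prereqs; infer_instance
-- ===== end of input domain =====

-- B replaces A's incremental dict-of-sets fold by grouping-by-scan: list the distinct
-- steps, then build each step's prerequisite set by an independent filter over the
-- instructions; same value, different (nested-scan) algorithm, no speed claim.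


-- ===== PORT A =====
-- fused loop: guard-insert both keys with empty sets, then add the edge
-- (step_prereqs[instruction[1]].add(...) mutates a present key's set: modify with
-- default Set.empty is exact here because the key is present at that point)
def create_step_prereqs (instructions : List (String × String)) : List (String × List String) :=
  (instructions.foldl (fun d ins =>
      let d1 := if d.contains ins.1 then d else d.insert ins.1 (PySem.Set.empty : PySem.Set String)
      let d2 := if d1.contains ins.2 then d1 else d1.insert ins.2 (PySem.Set.empty : PySem.Set String)
      d2.modify ins.2 (PySem.Set.empty : PySem.Set String) (fun s => PySem.Set.add s ins.1))
    PySem.Dict.empty).items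

-- ===== PORT B =====
-- grouping-by-scan: distinct steps via dict.fromkeys (= PySem.List.dedup), then for each
-- step a set comprehension over the instructions ({a for a,b in instructions if b == s})
def create_step_prereqs_alt (instructions : List (String × String)) : List (String × List String) :=
  let steps := PySem.List.dedup (instructions.flatMap (fun p => [p.1, p.2]))
  steps.map (fun s =>
    (s, PySem.Set.ofList ((instructions.filter (fun p => p.2 == s)).map (·.1))))

-- ===== PRECONDITION & SPEC =====
def Spec_create_step_prereqs (instructions : List (String × String)) (out : List (String × List String)) : Prop := out = create_step_prereqs_alt instructions
instance (instructions : List (String × String)) (out : List (String × List String)) : Decidable (Spec_create_step_prereqs instructions out) := by unfold Spec_create_step_prereqs; infer_instance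

-- ===== CLAIM (what is proved, stated in full; the proofs are below) =====
def Claim_equal_create_step_prereqs : Prop := ∀ (instructions : List (String × String)), Dom_create_step_prereqs instructions → Spec_create_step_prereqs instructions (create_step_prereqs instructions)

-- ===== LEMMAS AND PROOFS =====
def pvStepA (d : PySem.Dict String (PySem.Set String)) (ins : String × String) : PySem.Dict String (PySem.Set String) :=
  let d1 := if d.contains ins.1 then d else d.insert ins.1 (PySem.Set.empty : PySem.Set String)
  let d2 := if d1.contains ins.2 then d1 else d1.insert ins.2 (PySem.Set.empty : PySem.Set String)
  d2.modify ins.2 (PySem.Set.empty : PySem.Set String) (fun s => PySem.Set.add s ins.1)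

lemma pvKeys_condIns (d : PySem.Dict String (PySem.Set String)) (s : String) :
    (if d.contains s then d else d.insert s (PySem.Set.empty : PySem.Set String)).keys
      = PySem.Set.add d.keys s := by
  by_cases h : d.contains s = true
  · rw [if_pos h, PySem.Set.add_of_mem ((PySem.Dict.contains_iff_mem_keys d s).1 h)]
  · rw [if_neg (by simp [h]),
      PySem.Dict.keys_insert_of_not_contains d _ (by simpa using h),
      PySem.Set.add_of_not_mem (fun hm => h ((PySem.Dict.contains_iff_mem_keys d s).2 hm))]

lemma pvContains_condIns (d : PySem.Dict String (PySem.Set String)) (s k : String) :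
    (if d.contains s then d else d.insert s (PySem.Set.empty : PySem.Set String)).contains k
      = (k == s || d.contains k) := by
  by_cases h : d.contains s = true
  · rw [if_pos h]
    by_cases hk : k = s
    · subst hk; simp [h]
    · simp [hk]
  · rw [if_neg (by simp [h]), PySem.Dict.contains_insert]

lemma pvGetD_condIns (d : PySem.Dict String (PySem.Set String)) (s : String) (k : String) :
    (if d.contains s then d else d.insert s (PySem.Set.empty : PySem.Set String)).getD k (PySem.Set.empty : PySem.Set String)
      = d.getD k (PySem.Set.empty : PySem.Set String) := by
  by_cases h : d.contains s = true
  · rw [if_pos h]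
  · rw [if_neg (by simp [h]), PySem.Dict.getD_insert]
    split_ifs with hk
    · subst hk; rw [PySem.Dict.getD_of_not_contains d _ (by simpa using h)]
    · rfl

lemma pvKeys_stepA (d : PySem.Dict String (PySem.Set String)) (p : String × String) :
    (pvStepA d p).keys = PySem.Set.add (PySem.Set.add d.keys p.1) p.2 := by
  show ((_ : PySem.Dict String (PySem.Set String)).modify _ _ _).keys = _
  rw [PySem.Dict.keys_modify, PySem.Dict.keys_insert_of_contains _ _
    (by rw [pvContains_condIns]; simp), pvKeys_condIns, pvKeys_condIns]

lemma pvGetD_stepA (d : PySem.Dict String (PySem.Set String)) (p : String × String) (k : String) :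
    (pvStepA d p).getD k (PySem.Set.empty : PySem.Set String) =
      if p.2 = k then PySem.Set.add (d.getD k (PySem.Set.empty : PySem.Set String)) p.1 else d.getD k (PySem.Set.empty : PySem.Set String) := by
  show ((_ : PySem.Dict String (PySem.Set String)).modify _ _ _).getD k _ = _
  rw [PySem.Dict.getD_modify]
  simp only [pvGetD_condIns]
  by_cases h : k = p.2
  · subst h; simp
  · rw [if_neg h, if_neg (fun hh : p.2 = k => h hh.symm)]

lemma pvFoldA_keys (l : List (String × String)) (d : PySem.Dict String (PySem.Set String)) :
    (l.foldl pvStepA d).keys = PySem.Set.update d.keys (l.flatMap (fun p => [p.1, p.2])) := by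
  induction l generalizing d with
  | nil => rfl
  | cons p t ih =>
      rw [List.foldl_cons, ih, pvKeys_stepA, List.flatMap_cons]
      rw [show ([p.1, p.2] ++ t.flatMap fun p => [p.1, p.2]) =
        p.1 :: p.2 :: t.flatMap (fun p => [p.1, p.2]) from rfl,
        PySem.Set.update_cons, PySem.Set.update_cons]

lemma pvFoldA_getD (l : List (String × String)) (d : PySem.Dict String (PySem.Set String)) (k : String) :
    (l.foldl pvStepA d).getD k (PySem.Set.empty : PySem.Set String) =
      PySem.Set.update (d.getD k (PySem.Set.empty : PySem.Set String)) ((l.filter (fun p => p.2 == k)).map (·.1)) := by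
  induction l generalizing d with
  | nil => rfl
  | cons p t ih =>
      rw [List.foldl_cons, ih, pvGetD_stepA, List.filter_cons]
      by_cases h : p.2 = k
      · rw [if_pos h, if_pos (by simpa using h), List.map_cons, PySem.Set.update_cons]
      · rw [if_neg h, if_neg (by simpa using h)]

lemma pvMain (l : List (String × String)) : create_step_prereqs l = create_step_prereqs_alt l := by
  have hA : create_step_prereqs l = (l.foldl pvStepA PySem.Dict.empty).items := rfl
  set flat := l.flatMap (fun p => [p.1, p.2]) with hflat
  have hkeysA : (l.foldl pvStepA PySem.Dict.empty).keys = PySem.Set.ofList flat := by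
    rw [pvFoldA_keys]
    show PySem.Set.update PySem.Set.empty flat = _
    exact PySem.Set.update_empty flat
  rw [hA,
    PySem.Dict.items_eq_map_keys _ (by rw [hkeysA]; exact PySem.Set.nodup_ofList flat)
      (PySem.Set.empty : PySem.Set String),
    hkeysA]
  show _ = create_step_prereqs_alt l
  unfold create_step_prereqs_alt
  rw [PySem.List.dedup_eq_ofList]
  refine List.map_congr_left (fun k _ => ?_)
  rw [pvFoldA_getD, PySem.Dict.getD_empty]
  show (k, PySem.Set.update PySem.Set.empty _) = _
  rw [PySem.Set.update_empty]

-- ===== VERDICT (by name: the statement is the Claim_ definition above) =====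
theorem create_step_prereqs_spec : Claim_equal_create_step_prereqs := by
  intro instructions _
  show create_step_prereqs instructions = create_step_prereqs_alt instructions
  exact pvMain instructions
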